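-- pv_equiv track=rewrite | github.com/tnakaicode/jburkardt-python | vector/vector.py | vector_lex_rank
-- ===== SOURCE A (Python) =====
-- def vector_lex_rank ( d, b, a ):
--
-- #*****************************************************************************80
-- #
-- ## vector_lex_rank() ranks a vector using lexicographic order.
-- #
-- #  Example:
-- #
-- #    d = 3,
-- #    b = 3
-- #    A = ( 2, 1, 3 )
-- #
-- #    RANK = 12
-- #
-- #  Licensing:
-- #
-- #    This code is distributed under the MIT license.
-- #
-- #  Modified:
-- #
-- #    01 December 2022
-- #
-- #  Author:
-- #
-- #    John Burkardt
-- #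
-- #  Input:
-- #
-- #    integer d: the vector dimension.
-- #
-- #    integer b, the upper limit for the array indices.
-- #
-- #    integer A(d), the vector to be ranked.
-- #
-- #  Output:
-- #
-- #    integer RANK, the rank of the index vector.
-- #
--   for i in range ( 0, d ):
--     if ( a[i] < 1 or b < a[i] ):
--       raise Exception ( 'vector_lex_rank - a[] contains illegal values.' )
--
--   rank = 1
--   rang = 1
--   for i in range ( d - 1, -1, -1 ):
--     rank = rank + ( a[i] - 1 ) * rang
--     rang = rang * b
--
--   return rank
-- ===== SOURCE B (Python) =====
-- def vector_lex_rank ( d, b, a ):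
--   # One forward Horner pass: a single accumulator, validation folded into the
--   # same loop (element 0 is still tested first, so the raise set is unchanged).
--   acc = 0
--   for i in range ( 0, d ):
--     ai = a[i]
--     if ( ai < 1 or b < ai ):
--       raise Exception ( 'vector_lex_rank - a[] contains illegal values.' )
--     acc = acc * b + ( ai - 1 )
--   return acc + 1
-- ===== Notes on version B (the rewrite author's own statement) =====
-- stated objective: simpler
-- what changed: A validates in one pass then accumulates the rank in a second, reverse-index loop maintaining two state variables (rank and the place value rang=b^k); B is a single forward Horner pass with one accumulator acc=acc*b+(a[i]-1), no power variable and no separate validation loop.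
import Mathlib
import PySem

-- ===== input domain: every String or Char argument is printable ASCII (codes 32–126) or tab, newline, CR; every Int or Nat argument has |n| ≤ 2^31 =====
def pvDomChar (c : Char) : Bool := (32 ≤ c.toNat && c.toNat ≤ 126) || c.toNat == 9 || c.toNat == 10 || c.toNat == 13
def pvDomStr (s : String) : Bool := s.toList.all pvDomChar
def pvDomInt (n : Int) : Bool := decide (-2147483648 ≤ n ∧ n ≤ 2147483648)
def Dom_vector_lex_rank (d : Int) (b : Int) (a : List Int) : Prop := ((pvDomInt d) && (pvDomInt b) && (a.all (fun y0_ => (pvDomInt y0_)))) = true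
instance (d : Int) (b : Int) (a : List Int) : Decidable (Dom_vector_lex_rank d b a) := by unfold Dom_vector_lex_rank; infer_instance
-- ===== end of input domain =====

-- B replaces A's validate-then-reverse-accumulate (two loops, rank/rang state pair)
-- by a single forward Horner pass with one accumulator; return values are equal on Pre_.


-- ===== PORT A =====
-- A's first loop only raises (a[i] out of [1,b]) — those inputs are excluded by Pre_;
-- the index read a[i] is exact under Pre_ (0 ≤ i < d ≤ len a) via pyGetD.
def vector_lex_rank (d : Int) (b : Int) (a : List Int) : Int :=
  let st : Int × Int :=
    (PySem.List.pyRange (d - 1) (-1) (-1)).foldl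
      (fun (st : Int × Int) i =>
        (st.1 + (PySem.List.pyGetD a i 0 - 1) * st.2, st.2 * b))
      (1, 1)
  st.1

-- ===== PORT B =====
-- B's in-loop range check only raises — excluded by Pre_ (same raise set as A).
def vector_lex_rank_alt (d : Int) (b : Int) (a : List Int) : Int :=
  ((PySem.List.pyRange 0 d 1).foldl
      (fun (acc : Int) i => acc * b + (PySem.List.pyGetD a i 0 - 1)) 0) + 1

-- ===== PRECONDITION & SPEC =====
-- Pre_ excludes exactly the inputs where the Python A raises: an index beyond len(a)
-- (IndexError) or an element of the first d entries outside [1, b] (explicit raise).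
def Pre_vector_lex_rank (d : Int) (b : Int) (a : List Int) : Prop :=
  d ≤ (a.length : Int) ∧ ∀ x ∈ a.take d.toNat, 1 ≤ x ∧ x ≤ b
instance (d : Int) (b : Int) (a : List Int) : Decidable (Pre_vector_lex_rank d b a) := by
  unfold Pre_vector_lex_rank; infer_instance
def pvWitness_vector_lex_rank : Int × Int × List Int := (3, 3, [2, 1, 3])
def Spec_vector_lex_rank (d : Int) (b : Int) (a : List Int) (out : Int) : Prop := out = vector_lex_rank_alt d b a
instance (d : Int) (b : Int) (a : List Int) (out : Int) : Decidable (Spec_vector_lex_rank d b a out) := by unfold Spec_vector_lex_rank; infer_instance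

-- ===== CLAIM (what is proved, stated in full; the proofs are below) =====
def Claim_equal_vector_lex_rank : Prop := ∀ (d : Int) (b : Int) (a : List Int), Dom_vector_lex_rank d b a → Pre_vector_lex_rank d b a → Spec_vector_lex_rank d b a (vector_lex_rank d b a)

-- ===== LEMMAS AND PROOFS =====

-- Horner fold from a general initial accumulator.
theorem horner_foldl_init (v : Int → Int) (b c : Int) (xs : List Int) :
    xs.foldl (fun acc i => acc * b + (v i - 1)) c =
      c * b ^ xs.length + xs.foldl (fun acc i => acc * b + (v i - 1)) 0 := by
  induction xs generalizing c with
  | nil => simp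
  | cons x t ih =>
      simp only [List.foldl_cons, List.length_cons]
      rw [ih (c * b + (v x - 1)), ih (0 * b + (v x - 1))]
      ring

-- A's reverse-order place-value loop, characterised against B's Horner fold.
theorem revfold_eq_horner (v : Int → Int) (b : Int) (xs : List Int) (r p : Int) :
    xs.reverse.foldl
        (fun (st : Int × Int) i => (st.1 + (v i - 1) * st.2, st.2 * b)) (r, p) =
      (r + (xs.foldl (fun acc i => acc * b + (v i - 1)) 0) * p, p * b ^ xs.length) := by
  induction xs generalizing r p with
  | nil => simp
  | cons x t ih =>
      simp only [List.reverse_cons, List.foldl_append, List.foldl_cons, List.foldl_nil,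
        List.length_cons]
      rw [ih]
      rw [horner_foldl_init v b (0 * b + (v x - 1)) t]
      simp only [Prod.mk.injEq]
      constructor <;> ring

-- ===== VERDICT (by name: the statement is the Claim_ definition above) =====
theorem vector_lex_rank_spec : Claim_equal_vector_lex_rank := by
  intro d b a _ _
  unfold Spec_vector_lex_rank vector_lex_rank vector_lex_rank_alt
  have hrev : PySem.List.pyRange (d - 1) (-1) (-1) = (PySem.List.pyRange 0 d 1).reverse := by
    rw [PySem.List.pyRange_neg_one_eq_reverse]
    norm_num
  rw [hrev, revfold_eq_horner (fun i => PySem.List.pyGetD a i 0) b (PySem.List.pyRange 0 d 1) 1 1]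
  ring
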